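-- pv_equiv track=rewrite | github.com/RManLuo/GSim | utils/evaluator.py | _cluster_to_predict_label
-- ===== SOURCE A (Python) =====
-- def _cluster_to_predict_label(cluster):
--     point_idxs = []
--     y_pred = []
--     for y, x in enumerate(cluster):
--         point_idxs.extend(x)
--         y_pred += [y] * len(x)
--     result_list = [i for _, i in sorted(zip(point_idxs, y_pred))]
--     return result_list
-- ===== SOURCE B (Python) =====
-- def _cluster_to_predict_label(cluster):
--     # Bucket labels by point index, then emit buckets in increasing index order.
--     buckets = {}
--     for y, xs in enumerate(cluster):
--         for x in xs:
--             buckets.setdefault(x, []).append(y)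
--     out = []
--     for k in sorted(buckets):
--         out += buckets[k]
--     return out
-- ===== Notes on version B (the rewrite author's own statement) =====
-- stated objective: alternative
-- what changed: Instead of flattening all (point index, label) pairs and sorting the whole pair list lexicographically, B groups labels into a dict of per-index buckets in one pass and concatenates the buckets over the sorted distinct keys.
import Mathlib
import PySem

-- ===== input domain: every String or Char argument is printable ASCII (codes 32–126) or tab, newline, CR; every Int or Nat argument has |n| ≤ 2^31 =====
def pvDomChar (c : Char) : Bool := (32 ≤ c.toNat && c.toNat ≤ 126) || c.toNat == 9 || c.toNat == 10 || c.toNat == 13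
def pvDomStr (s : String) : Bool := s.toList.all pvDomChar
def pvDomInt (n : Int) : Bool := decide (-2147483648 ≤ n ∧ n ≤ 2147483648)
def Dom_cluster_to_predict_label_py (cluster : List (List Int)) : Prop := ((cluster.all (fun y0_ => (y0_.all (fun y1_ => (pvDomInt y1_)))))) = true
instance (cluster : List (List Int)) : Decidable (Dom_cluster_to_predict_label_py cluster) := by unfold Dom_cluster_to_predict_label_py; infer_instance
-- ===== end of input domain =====

-- B replaces A's global sort of all (index, label) pairs by a dict of per-index label
-- buckets emitted in sorted key order (objective: alternative; not measured faster).

-- ===== PORT A =====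
-- literal port of A: build point_idxs and y_pred in one loop, sort the zipped pairs, take labels
def cluster_to_predict_label_py (cluster : List (List Int)) : List Int :=
  let st := (PySem.List.enumerate cluster 0).foldl
      (fun (st : List Int × List Int) yx =>
        (st.1 ++ yx.2, st.2 ++ PySem.List.pyRepeat [yx.1] (PySem.List.len yx.2)))
      ([], [])
  (PySem.List.sorted2 (st.1.zip st.2) Prod.fst Prod.snd false).map (fun p => p.2)

-- ===== PORT B =====
-- literal port of B: buckets[x] gets label y appended; output buckets in sorted key order
def cluster_to_predict_label_py_alt (cluster : List (List Int)) : List Int :=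
  let buckets := (PySem.List.enumerate cluster 0).foldl
      (fun (d : PySem.Dict Int (List Int)) yx =>
        yx.2.foldl (fun d x => d.modify x [] (fun v => v ++ [yx.1])) d)
      PySem.Dict.empty
  (PySem.List.sorted buckets.keys (fun k => k) false).foldl
      (fun out k => out ++ buckets.getD k []) []

-- ===== PRECONDITION & SPEC =====
def Spec_cluster_to_predict_label_py (cluster : List (List Int)) (out : List Int) : Prop := out = cluster_to_predict_label_py_alt cluster
instance (cluster : List (List Int)) (out : List Int) : Decidable (Spec_cluster_to_predict_label_py cluster out) := by unfold Spec_cluster_to_predict_label_py; infer_instance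

-- ===== CLAIM (what is proved, stated in full; the proofs are below) =====
def Claim_equal_cluster_to_predict_label_py : Prop := ∀ (cluster : List (List Int)), Dom_cluster_to_predict_label_py cluster → Spec_cluster_to_predict_label_py cluster (cluster_to_predict_label_py cluster)

-- ===== LEMMAS AND PROOFS =====

-- the flat list of (point index, cluster label) pairs both programs work over
def pvPairs (cluster : List (List Int)) : List (Int × Int) :=
  (PySem.List.enumerate cluster 0).flatMap (fun yx => yx.2.map (fun x => (x, yx.1)))

-- Python's tuple comparison on Int × Int
def pvLexLt (a b : Int × Int) : Bool :=
  decide (a.1 < b.1) || (!decide (b.1 < a.1) && decide (a.2 < b.2))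

def pvLexLe (a b : Int × Int) : Prop := a.1 < b.1 ∨ (a.1 = b.1 ∧ a.2 ≤ b.2)

theorem pvLexLt_eq_false_iff (a b : Int × Int) : pvLexLt a b = false ↔ pvLexLe b a := by
  simp [pvLexLt, pvLexLe]; omega

theorem pvLexLt_eq_true_iff (a b : Int × Int) : pvLexLt a b = true ↔ ¬ pvLexLe b a := by
  simp [pvLexLt, pvLexLe]; omega

theorem pvLexLe_trans {a b c : Int × Int} (h1 : pvLexLe a b) (h2 : pvLexLe b c) : pvLexLe a c := by
  simp only [pvLexLe] at *; omega

theorem pvLexLe_antisymm {a b : Int × Int} (h1 : pvLexLe a b) (h2 : pvLexLe b a) : a = b := by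
  simp only [pvLexLe] at *
  have : a.1 = b.1 ∧ a.2 = b.2 := by omega
  exact Prod.ext this.1 this.2

theorem pvLexLe_total (a b : Int × Int) : pvLexLe a b ∨ pvLexLe b a := by
  simp only [pvLexLe]; omega

theorem pv_insertBy_pairwise (x : Int × Int) :
    ∀ (ys : List (Int × Int)), ys.Pairwise pvLexLe →
      (PySem.List.insertBy pvLexLt x ys).Pairwise pvLexLe := by
  intro ys
  induction ys with
  | nil => intro _; simp [PySem.List.insertBy]
  | cons y ys ih =>
    intro hp
    rw [List.pairwise_cons] at hp
    by_cases h : pvLexLt x y = true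
    · simp only [PySem.List.insertBy, h, if_pos]
      have hxy : pvLexLe x y := by
        rcases pvLexLe_total x y with h' | h'
        · exact h'
        · exact absurd h' ((pvLexLt_eq_true_iff x y).mp h)
      refine List.pairwise_cons.mpr ⟨?_, List.pairwise_cons.mpr ⟨hp.1, hp.2⟩⟩
      intro z hz
      rcases List.mem_cons.mp hz with rfl | hz
      · exact hxy
      · exact pvLexLe_trans hxy (hp.1 z hz)
    · have h' : pvLexLt x y = false := by revert h; cases pvLexLt x y <;> simp
      simp only [PySem.List.insertBy, h', Bool.false_eq_true, if_false]
      refine List.pairwise_cons.mpr ⟨?_, ih hp.2⟩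
      intro z hz
      rcases (PySem.List.mem_insertBy pvLexLt x z ys).mp hz with hzx | hz
      · rw [hzx]; exact (pvLexLt_eq_false_iff x y).mp h'
      · exact hp.1 z hz

theorem pv_sortfold_pairwise :
    ∀ (l acc : List (Int × Int)), acc.Pairwise pvLexLe →
      (l.foldl (fun acc x => PySem.List.insertBy pvLexLt x acc) acc).Pairwise pvLexLe := by
  intro l
  induction l with
  | nil => intro acc h; simpa using h
  | cons x l ih =>
    intro acc h
    exact ih _ (pv_insertBy_pairwise x acc h)

theorem pv_sorted2_eq_foldl (L : List (Int × Int)) :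
    PySem.List.sorted2 L Prod.fst Prod.snd false
      = L.foldl (fun acc x => PySem.List.insertBy pvLexLt x acc) [] := rfl

theorem pv_sorted2_pairwise (L : List (Int × Int)) :
    (PySem.List.sorted2 L Prod.fst Prod.snd false).Pairwise pvLexLe := by
  rw [pv_sorted2_eq_foldl]
  exact pv_sortfold_pairwise L [] (by simp)

-- partition: concatenating the filter-buckets over a nodup covering key list is a permutation
theorem pv_perm_flatMap_filter :
    ∀ (K : List Int) (L : List (Int × Int)), K.Nodup → (∀ p ∈ L, p.1 ∈ K) →
      (K.flatMap (fun k => L.filter (fun p => p.1 == k))).Perm L := by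
  intro K
  induction K with
  | nil =>
    intro L _ hcov
    have : L = [] := by
      cases L with
      | nil => rfl
      | cons p L => exact absurd (hcov p (by simp)) (by simp)
    simp [this]
  | cons k K ih =>
    intro L hnd hcov
    rw [List.nodup_cons] at hnd
    rw [List.flatMap_cons]
    have hflat : K.flatMap (fun k' => L.filter (fun p => p.1 == k'))
        = K.flatMap (fun k' => (L.filter (fun p => !(p.1 == k))).filter (fun p => p.1 == k')) := by
      apply List.flatMap_congr
      intro k' hk'
      rw [List.filter_filter]
      symm
      apply List.filter_congr
      intro p _
      by_cases hp : p.1 = k'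
      · have hkk' : ¬ (k' = k) := fun h => hnd.1 (h ▸ hk')
        simp [hp, hkk']
      · simp [hp]
    rw [hflat]
    have hperm := ih (L.filter (fun p => !(p.1 == k))) hnd.2 (by
      intro p hp
      rw [List.mem_filter] at hp
      rcases List.mem_cons.mp (hcov p hp.1) with h | h
      · exact absurd h (by simpa using hp.2)
      · exact h)
    exact (List.Perm.append_left _ hperm).trans (List.filter_append_perm _ L)

-- labels along pvPairs are nondecreasing
theorem pv_pairs_snd_mono (cluster : List (List Int)) :
    (pvPairs cluster).Pairwise (fun p q => p.2 ≤ q.2) := by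
  unfold pvPairs
  rw [List.pairwise_flatMap]
  constructor
  · intro a _
    rw [List.pairwise_map]
    exact List.pairwise_of_forall (fun _ _ => le_refl a.1)
  · apply List.Pairwise.imp ?_ (PySem.List.pairwise_lt_enumerate cluster 0)
    intro a b hab x hx y hy
    rw [List.mem_map] at hx hy
    obtain ⟨_, _, rfl⟩ := hx
    obtain ⟨_, _, rfl⟩ := hy
    exact le_of_lt hab

theorem pv_mem_filter_fst {L : List (Int × Int)} {k : Int} {p : Int × Int}
    (hp : p ∈ L.filter (fun p => p.1 == k)) : p.1 = k := by
  rw [List.mem_filter] at hp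
  exact beq_iff_eq.mp hp.2

theorem pv_bucket_pairwise (cluster : List (List Int)) (k : Int) :
    ((pvPairs cluster).filter (fun p => p.1 == k)).Pairwise pvLexLe := by
  have h := (pv_pairs_snd_mono cluster).sublist
      (List.filter_sublist (l := pvPairs cluster) (p := fun p => p.1 == k))
  refine h.imp_of_mem ?_
  intro p q hp hq hle
  right
  exact ⟨(pv_mem_filter_fst hp).trans (pv_mem_filter_fst hq).symm, hle⟩

theorem pv_R_pairwise (cluster : List (List Int)) :
    ((PySem.List.sorted (PySem.Set.ofList ((pvPairs cluster).map Prod.fst)) (fun k => k) false).flatMap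
      (fun k => (pvPairs cluster).filter (fun p => p.1 == k))).Pairwise pvLexLe := by
  rw [List.pairwise_flatMap]
  refine ⟨fun k _ => pv_bucket_pairwise cluster k, ?_⟩
  apply List.Pairwise.imp ?_ (PySem.List.sorted_ofList_pairwise_lt ((pvPairs cluster).map Prod.fst))
  intro k1 k2 h12 x hx y hy
  left
  rw [pv_mem_filter_fst hx, pv_mem_filter_fst hy]
  exact h12

theorem pv_sorted2_eq_R (cluster : List (List Int)) :
    PySem.List.sorted2 (pvPairs cluster) Prod.fst Prod.snd false
      = (PySem.List.sorted (PySem.Set.ofList ((pvPairs cluster).map Prod.fst)) (fun k => k) false).flatMap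
          (fun k => (pvPairs cluster).filter (fun p => p.1 == k)) := by
  have hK : (PySem.List.sorted (PySem.Set.ofList ((pvPairs cluster).map Prod.fst)) (fun k => k) false).Nodup :=
    ((PySem.List.sorted_perm (PySem.Set.ofList ((pvPairs cluster).map Prod.fst))
        (fun k => k) false).nodup_iff).mpr
      (PySem.Set.nodup_ofList ((pvPairs cluster).map Prod.fst))
  have hcov : ∀ p ∈ pvPairs cluster,
      p.1 ∈ PySem.List.sorted (PySem.Set.ofList ((pvPairs cluster).map Prod.fst)) (fun k => k) false := by
    intro p hp
    rw [PySem.List.mem_sorted, PySem.Set.mem_ofList]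
    exact List.mem_map.mpr ⟨p, hp, rfl⟩
  have hperm := pv_perm_flatMap_filter _ (pvPairs cluster) hK hcov
  exact List.Perm.eq_of_pairwise
    (fun a b _ _ h1 h2 => pvLexLe_antisymm h1 h2)
    (pv_sorted2_pairwise _) (pv_R_pairwise cluster)
    ((PySem.List.sorted2_perm _ _ _ _).trans hperm.symm)

theorem pv_zip_replicate : ∀ (xs : List Int) (y : Int),
    xs.zip (List.replicate xs.length y) = xs.map (fun x => (x, y)) := by
  intro xs y
  induction xs with
  | nil => rfl
  | cons x xs ih => simp [List.replicate_succ, ih]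

theorem pv_zip_flatMap : ∀ (l : List (Int × List Int)),
    (l.flatMap (fun yx => yx.2)).zip (l.flatMap (fun yx => List.replicate yx.2.length yx.1))
      = l.flatMap (fun yx => yx.2.map (fun x => (x, yx.1))) := by
  intro l
  induction l with
  | nil => rfl
  | cons a l ih =>
    simp only [List.flatMap_cons]
    rw [List.zip_append (by simp), ih, pv_zip_replicate]

theorem pv_A_eq (cluster : List (List Int)) :
    cluster_to_predict_label_py cluster
      = (PySem.List.sorted2 (pvPairs cluster) Prod.fst Prod.snd false).map (fun p => p.2) := by
  unfold cluster_to_predict_label_py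
  rw [PySem.List.foldl_prod_mk
        (f := fun (a : List Int) (yx : Int × List Int) => a ++ yx.2)
        (g := fun (a : List Int) (yx : Int × List Int) => a ++ PySem.List.pyRepeat [yx.1] (PySem.List.len yx.2))]
  rw [PySem.List.foldl_append_eq_flatMap, PySem.List.foldl_append_eq_flatMap]
  simp only [List.nil_append, PySem.List.pyRepeat_singleton, PySem.List.len, Int.toNat_natCast]
  rw [pv_zip_flatMap]
  rfl

theorem pv_buckets_eq (cluster : List (List Int)) :
    (PySem.List.enumerate cluster 0).foldl
        (fun (d : PySem.Dict Int (List Int)) yx =>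
          yx.2.foldl (fun d x => d.modify x [] (fun v => v ++ [yx.1])) d)
        PySem.Dict.empty
      = (pvPairs cluster).foldl
          (fun (d : PySem.Dict Int (List Int)) p => d.modify p.1 [] (fun v => v ++ [p.2]))
          PySem.Dict.empty := by
  unfold pvPairs
  rw [List.foldl_flatMap]
  simp only [List.foldl_map]

theorem pv_B_eq (cluster : List (List Int)) :
    cluster_to_predict_label_py_alt cluster
      = (PySem.List.sorted (PySem.Set.ofList ((pvPairs cluster).map Prod.fst)) (fun k => k) false).flatMap
          (fun k => ((pvPairs cluster).filter (fun p => p.1 == k)).map (fun p => p.2)) := by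
  simp only [cluster_to_predict_label_py_alt]
  rw [pv_buckets_eq]
  have hkeys : ((pvPairs cluster).foldl
        (fun (d : PySem.Dict Int (List Int)) p => d.modify p.1 [] (fun v => v ++ [p.2]))
        PySem.Dict.empty).keys
      = PySem.Set.ofList ((pvPairs cluster).map Prod.fst) := by
    rw [PySem.Dict.keys_foldl_modify_key (pvPairs cluster) (fun p => p.1) []
          (fun _ p => fun v => v ++ [p.2]) PySem.Dict.empty]
    rw [PySem.Dict.keys_empty, PySem.Set.ofList_eq_foldl]
    rfl
  have hgetD : ∀ k : Int, ((pvPairs cluster).foldl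
        (fun (d : PySem.Dict Int (List Int)) p => d.modify p.1 [] (fun v => v ++ [p.2]))
        PySem.Dict.empty).getD k []
      = ((pvPairs cluster).filter (fun p => p.1 == k)).map (fun p => p.2) := by
    intro k
    rw [PySem.Dict.getD_foldl_modify_append, PySem.Dict.getD_empty, List.nil_append]
  rw [hkeys, PySem.List.foldl_append_eq_flatMap, List.nil_append]
  apply List.flatMap_congr
  intro k _
  exact hgetD k

-- ===== VERDICT (by name: the statement is the Claim_ definition above) =====
theorem cluster_to_predict_label_py_spec : Claim_equal_cluster_to_predict_label_py := by
  intro cluster _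
  unfold Spec_cluster_to_predict_label_py
  rw [pv_A_eq, pv_B_eq, pv_sorted2_eq_R, List.map_flatMap]
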